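-- pv_equiv track=rewrite | github.com/FlaxAdvisors/sonic-buildimage | device/accton/x86_64-accton_wedge100s_32x-r0/plugins/sfputil.py | _bit_swap
-- ===== SOURCE A (Python) =====
-- def _bit_swap(value):
--     """Swap even/odd bit pairs per ONL sfpi.c onlp_sfpi_reg_val_to_port_sequence().
--     PCA9535 wiring interleaves even/odd ports; this corrects the mapping."""
--     result = 0
--     for i in range(8):
--         if i % 2 == 1:
--             result |= (value & (1 << i)) >> 1
--         else:
--             result |= (value & (1 << i)) << 1
--     return result
-- ===== SOURCE B (Python) =====
-- def _bit_swap(value):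
--     """Swap even/odd bit pairs per ONL sfpi.c onlp_sfpi_reg_val_to_port_sequence.
--
--     Closed-form parallel masking: shift the even bits (0x55) left and the
--     odd bits (0xAA) right in one expression instead of looping per bit.
--     """
--     return ((value & 0x55) << 1) | ((value & 0xAA) >> 1)
-- ===== Notes on version B (the rewrite author's own statement) =====
-- stated objective: idiomatic
-- what changed: Replaced the per-bit loop over range(8) with a single closed-form parallel-mask expression ((value & 0x55) << 1) | ((value & 0xAA) >> 1).
import Mathlib
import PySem

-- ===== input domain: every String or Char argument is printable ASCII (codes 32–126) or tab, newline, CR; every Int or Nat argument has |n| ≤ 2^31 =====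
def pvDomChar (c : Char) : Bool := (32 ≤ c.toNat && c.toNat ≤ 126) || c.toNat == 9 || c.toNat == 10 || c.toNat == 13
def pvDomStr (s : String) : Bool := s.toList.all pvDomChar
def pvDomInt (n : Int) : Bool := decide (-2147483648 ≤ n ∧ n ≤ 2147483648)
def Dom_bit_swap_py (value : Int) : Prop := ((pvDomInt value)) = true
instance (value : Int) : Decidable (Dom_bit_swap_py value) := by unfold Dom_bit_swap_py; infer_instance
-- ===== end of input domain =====

-- B replaces the 8-iteration per-bit loop with one closed-form parallel-mask expression (idiomatic).

-- ===== PORT A =====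
def bit_swap_py (value : Int) : Int :=
  (PySem.List.pyRange 0 8 1).foldl
    (fun result i =>
      if PySem.Int.mod i 2 = 1 then
        PySem.Int.bor result ((PySem.Int.band value (1 <<< i.toNat)) >>> 1)
      else
        PySem.Int.bor result ((PySem.Int.band value (1 <<< i.toNat)) <<< 1))
    0

-- ===== PORT B =====
def bit_swap_py_alt (value : Int) : Int :=
  PySem.Int.bor ((PySem.Int.band value 0x55) <<< 1) ((PySem.Int.band value 0xAA) >>> 1)

-- ===== PRECONDITION & SPEC =====
def Spec_bit_swap_py (value : Int) (out : Int) : Prop := out = bit_swap_py_alt value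
instance (value : Int) (out : Int) : Decidable (Spec_bit_swap_py value out) := by unfold Spec_bit_swap_py; infer_instance

-- ===== CLAIM (what is proved, stated in full; the proofs are below) =====
def Claim_equal_bit_swap_py : Prop := ∀ (value : Int), Dom_bit_swap_py value → Spec_bit_swap_py value (bit_swap_py value)

-- ===== LEMMAS AND PROOFS =====

-- AND-ing a mask below 256 only sees the low 8 bits of the other operand.
theorem pv_nat_mask (m u : Nat) (hm : m < 256) : m &&& u = m &&& (u % 256) := by
  apply Nat.eq_of_testBit_eq
  intro i
  by_cases hi : i < 8
  · rw [show (256 : Nat) = 2 ^ 8 from rfl, Nat.testBit_land, Nat.testBit_land,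
        Nat.testBit_mod_two_pow]
    simp [hi]
  · have hlt : m < 2 ^ i := lt_of_lt_of_le hm (by
      calc (256 : Nat) = 2 ^ 8 := by norm_num
      _ ≤ 2 ^ i := Nat.pow_le_pow_right (by norm_num) (by omega))
    simp [Nat.testBit_lt_two_pow hlt]

-- the negative-operand branch of band, reduced mod 256, for the ten masks the ports use
set_option maxRecDepth 100000 in
theorem pv_nat_neg : ∀ m ∈ ([1,2,4,8,16,32,64,128,85,170] : List Nat), ∀ s : Fin 256,
    m - (m &&& s.val) = (255 - s.val) &&& m := by decide

-- PySem.Int.band with a small mask only depends on v modulo 256.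
theorem pv_band_emod_aux (v : Int) (m : Nat) (hm256 : m < 256)
    (hneg : ∀ s : Fin 256, m - (m &&& s.val) = (255 - s.val) &&& m) :
    PySem.Int.band v (m : Int) = PySem.Int.band (v % 256) (m : Int) := by
  have hr0 : 0 ≤ v % 256 := by omega
  have h0 : (0 : Int) ≤ (m : Int) := by positivity
  unfold PySem.Int.band
  rw [if_pos hr0]
  by_cases hv : 0 ≤ v
  · rw [if_pos hv, if_pos h0, if_pos h0]
    simp only [Int.toNat_natCast]
    have ht : (v % 256).toNat = v.toNat % 256 := by omega
    rw [ht, Nat.land_comm v.toNat, pv_nat_mask m v.toNat hm256, Nat.land_comm]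
  · rw [if_neg hv, if_pos h0, if_pos h0]
    simp only [Int.toNat_natCast]
    have hs : (-v - 1).toNat % 256 < 256 := Nat.mod_lt _ (by norm_num)
    have ht : (v % 256).toNat = 255 - ((-v - 1).toNat % 256) := by omega
    rw [ht, pv_nat_mask m (-v - 1).toNat hm256]
    exact congrArg _ (hneg ⟨(-v - 1).toNat % 256, hs⟩)

theorem pv_band_emod (v : Int) (m : Int)
    (hm : m ∈ ([1,2,4,8,16,32,64,128,85,170] : List Int)) :
    PySem.Int.band v m = PySem.Int.band (v % 256) m := by
  fin_cases hm <;>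
  · exact_mod_cast pv_band_emod_aux v _ (by norm_num) (pv_nat_neg _ (by norm_num))

-- A's loop, unfolded over the literal range(8)
theorem pv_A_expand (v : Int) : bit_swap_py v =
    PySem.Int.bor (PySem.Int.bor (PySem.Int.bor (PySem.Int.bor (PySem.Int.bor (PySem.Int.bor
      (PySem.Int.bor (PySem.Int.bor 0
      ((PySem.Int.band v 1) <<< 1)) ((PySem.Int.band v 2) >>> 1))
      ((PySem.Int.band v 4) <<< 1)) ((PySem.Int.band v 8) >>> 1))
      ((PySem.Int.band v 16) <<< 1)) ((PySem.Int.band v 32) >>> 1))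
      ((PySem.Int.band v 64) <<< 1)) ((PySem.Int.band v 128) >>> 1) := by
  show (PySem.List.pyRange 0 8 1).foldl _ 0 = _
  rw [show PySem.List.pyRange 0 8 1 = [0,1,2,3,4,5,6,7] from by decide]
  simp [List.foldl, PySem.Int.mod]

theorem pv_reduceA (v : Int) : bit_swap_py v = bit_swap_py (v % 256) := by
  rw [pv_A_expand, pv_A_expand]
  rw [pv_band_emod v 1 (by norm_num), pv_band_emod v 2 (by norm_num),
      pv_band_emod v 4 (by norm_num), pv_band_emod v 8 (by norm_num),
      pv_band_emod v 16 (by norm_num), pv_band_emod v 32 (by norm_num),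
      pv_band_emod v 64 (by norm_num), pv_band_emod v 128 (by norm_num)]

theorem pv_reduceB (v : Int) : bit_swap_py_alt v = bit_swap_py_alt (v % 256) := by
  unfold bit_swap_py_alt
  rw [pv_band_emod v 0x55 (by norm_num), pv_band_emod v 0xAA (by norm_num)]

set_option maxRecDepth 100000 in
theorem pv_small (r : Fin 256) : bit_swap_py (r.val : Int) = bit_swap_py_alt (r.val : Int) := by
  revert r; decide

-- ===== VERDICT (by name: the statement is the Claim_ definition above) =====
theorem bit_swap_py_spec : Claim_equal_bit_swap_py := by
  intro v _
  unfold Spec_bit_swap_py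
  rw [pv_reduceA v, pv_reduceB v]
  have hr0 : 0 ≤ v % 256 := by omega
  have hr1 : v % 256 < 256 := by omega
  have h := pv_small ⟨(v % 256).toNat, by omega⟩
  simpa [Int.toNat_of_nonneg hr0] using h
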